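-- pv_equiv track=rewrite | github.com/pnobbe/aoc-python | 2024/10/solution.py | find_next_inclines_1
-- ===== SOURCE A (Python) =====
-- def find_next_inclines_1(matrix, coordinates, next_incline):
--     next_inclines = set()
--     for coordinate in coordinates:
--         x, y = coordinate
--         for dx, dy in [(0, 1), (1, 0), (0, -1), (-1, 0)]:
--             nx, ny = x + dx, y + dy
--             if nx < 0 or ny < 0 or nx >= len(matrix[0]) or ny >= len(matrix):
--                 continue
--             if matrix[ny][nx] == next_incline:
--                 next_inclines.add((nx, ny))
--
--     return next_inclines
-- ===== SOURCE B (Python) =====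
-- def find_next_inclines_1(matrix, coordinates, next_incline):
--     w = len(matrix[0]) if matrix else 0
--     matches = {(x, y)
--                for y, row in enumerate(matrix)
--                for x, v in enumerate(row[:w])
--                if v == next_incline}
--     result = set()
--     for x, y in coordinates:
--         result |= {(x, y + 1), (x + 1, y), (x, y - 1), (x - 1, y)} & matches
--     return result
-- ===== Notes on version B (the rewrite author's own statement) =====
-- stated objective: alternative
-- what changed: A probes the grid per neighbor of each coordinate (bounds checks + two indexings inside the loop); B inverts this: one full pass over the grid builds an index set of all cells valued next_incline, and the coordinate loop then just intersects each 4-neighbor set with that precomputed index, with no bounds checks or matrix access at all.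
import Mathlib
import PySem

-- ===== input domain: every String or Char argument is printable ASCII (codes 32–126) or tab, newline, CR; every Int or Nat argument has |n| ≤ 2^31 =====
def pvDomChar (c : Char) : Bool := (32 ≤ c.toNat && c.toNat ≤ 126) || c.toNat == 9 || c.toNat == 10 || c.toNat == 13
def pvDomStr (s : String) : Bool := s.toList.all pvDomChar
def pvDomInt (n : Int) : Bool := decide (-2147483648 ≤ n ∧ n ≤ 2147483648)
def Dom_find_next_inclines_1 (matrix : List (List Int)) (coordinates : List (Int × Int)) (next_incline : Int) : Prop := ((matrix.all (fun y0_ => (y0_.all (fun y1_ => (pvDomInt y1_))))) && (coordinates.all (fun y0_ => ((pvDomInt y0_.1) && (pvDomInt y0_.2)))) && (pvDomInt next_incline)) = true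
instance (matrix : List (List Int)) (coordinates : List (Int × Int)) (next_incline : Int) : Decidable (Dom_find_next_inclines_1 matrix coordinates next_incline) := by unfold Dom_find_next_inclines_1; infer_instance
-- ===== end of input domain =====

-- B inverts A's per-neighbor grid probing: one pass over the whole grid builds an index set of the
-- cells valued next_incline; the coordinate loop then just intersects each 4-neighbor set with that
-- index — no bounds checks or matrix indexing in the loop (objective: alternative; set return value).

-- ===== PORT A =====
def find_next_inclines_1 (matrix : List (List Int)) (coordinates : List (Int × Int)) (next_incline : Int) : List (Int × Int) :=
  coordinates.foldl (fun s c =>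
    ([((0:Int),(1:Int)), (1,0), (0,-1), (-1,0)] : List (Int × Int)).foldl (fun s d =>
      let nx := c.1 + d.1
      let ny := c.2 + d.2
      if nx < 0 ∨ ny < 0 ∨ ((PySem.List.pyGetD matrix 0 []).length : Int) ≤ nx ∨ (matrix.length : Int) ≤ ny then s
      else if PySem.List.pyGetD (PySem.List.pyGetD matrix ny []) nx 0 = next_incline then PySem.Set.add s (nx, ny)
      else s) s)
    ([] : PySem.Set (Int × Int))

-- ===== PORT B =====
-- Source B's index: {(x, y) for y, row in enumerate(matrix) for x, v in enumerate(row[:w]) if v == ni}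
-- (row[:w] with the nonnegative w = len(matrix[0]) if matrix else 0 is exactly List.take w)
def pvMatches (matrix : List (List Int)) (ni : Int) : PySem.Set (Int × Int) :=
  let w : Nat := match matrix with | [] => 0 | r :: _ => r.length
  PySem.Set.ofList ((PySem.List.enumerate matrix).flatMap (fun yr =>
    (PySem.List.enumerate (yr.2.take w)).filterMap (fun xv =>
      if xv.2 = ni then some (xv.1, yr.1) else none)))

def find_next_inclines_1_alt (matrix : List (List Int)) (coordinates : List (Int × Int)) (next_incline : Int) : List (Int × Int) :=
  let idx := pvMatches matrix next_incline
  coordinates.foldl (fun res c =>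
    PySem.Set.union res (PySem.Set.inter
      (PySem.Set.ofList [(c.1, c.2 + 1), (c.1 + 1, c.2), (c.1, c.2 - 1), (c.1 - 1, c.2)]) idx))
    ([] : PySem.Set (Int × Int))

-- ===== PRECONDITION & SPEC =====
-- Pre_ excludes exactly the inputs on which Python A raises IndexError: matrix[0] with an empty
-- matrix, or a ragged row shorter than row 0 hit by an in-bounds neighbor of some coordinate.
def Pre_find_next_inclines_1 (matrix : List (List Int)) (coordinates : List (Int × Int)) (next_incline : Int) : Prop :=
  ∀ c ∈ coordinates, ∀ d ∈ ([((0:Int),(1:Int)), (1,0), (0,-1), (-1,0)] : List (Int × Int)),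
    ¬(0 ≤ c.1 + d.1 ∧ 0 ≤ c.2 + d.2 ∧
      (matrix = [] ∨ (c.2 + d.2 < (matrix.length : Int) ∧ c.1 + d.1 < ((PySem.List.pyGetD matrix 0 []).length : Int) ∧ ((PySem.List.pyGetD matrix (c.2 + d.2) []).length : Int) ≤ c.1 + d.1)))
instance (matrix : List (List Int)) (coordinates : List (Int × Int)) (next_incline : Int) : Decidable (Pre_find_next_inclines_1 matrix coordinates next_incline) := by unfold Pre_find_next_inclines_1; infer_instance
def pvWitness_find_next_inclines_1 : List (List Int) × (List (Int × Int)) × Int := ([[0, 1], [1, 2]], [(0, 0)], 1)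

def Spec_find_next_inclines_1 (matrix : List (List Int)) (coordinates : List (Int × Int)) (next_incline : Int) (out : List (Int × Int)) : Prop := out = find_next_inclines_1_alt matrix coordinates next_incline
instance (matrix : List (List Int)) (coordinates : List (Int × Int)) (next_incline : Int) (out : List (Int × Int)) : Decidable (Spec_find_next_inclines_1 matrix coordinates next_incline out) := by unfold Spec_find_next_inclines_1; infer_instance

-- ===== CLAIM (what is proved, stated in full; the proofs are below) =====
def Claim_equal_find_next_inclines_1 : Prop := ∀ (matrix : List (List Int)) (coordinates : List (Int × Int)) (next_incline : Int), Dom_find_next_inclines_1 matrix coordinates next_incline → Pre_find_next_inclines_1 matrix coordinates next_incline → Spec_find_next_inclines_1 matrix coordinates next_incline (find_next_inclines_1 matrix coordinates next_incline)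

-- ===== LEMMAS AND PROOFS =====

-- membership in Source B's precomputed index, characterized by A's probe arithmetic
theorem pv_mem_matches (matrix : List (List Int)) (ni : Int) (nx ny : Int) :
    (nx, ny) ∈ pvMatches matrix ni ↔
      (0 ≤ nx ∧ 0 ≤ ny ∧ ny < (matrix.length : Int) ∧
       nx < ((PySem.List.pyGetD matrix 0 []).length : Int) ∧
       nx < ((PySem.List.pyGetD matrix ny []).length : Int) ∧
       PySem.List.pyGetD (PySem.List.pyGetD matrix ny []) nx 0 = ni) := by
  cases matrix with
  | nil => simp [pvMatches, PySem.List.enumerate, PySem.Set.ofList]; omega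
  | cons r rs =>
    show (nx, ny) ∈ PySem.Set.ofList ((PySem.List.enumerate (r :: rs)).flatMap (fun yr =>
        (PySem.List.enumerate (yr.2.take r.length)).filterMap (fun xv =>
          if xv.2 = ni then some (xv.1, yr.1) else none))) ↔ _
    simp only [PySem.Set.mem_ofList, List.mem_flatMap, List.mem_filterMap,
      PySem.List.mem_enumerate_iff, PySem.List.pyGetD_zero_cons]
    constructor
    · rintro ⟨yr, ⟨b, hb, rfl⟩, xv, ⟨a, ha, rfl⟩, hif⟩
      simp only [zero_add] at ha hif
      rw [List.length_take] at ha
      split at hif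
      · rename_i hv
        simp only [Option.some.injEq, Prod.mk.injEq] at hif
        obtain ⟨hx, hy⟩ := hif
        subst hx; subst hy
        have hget : PySem.List.pyGetD (r :: rs) ((b : Int)) [] = (r::rs)[b] := by
          rw [PySem.List.pyGetD_natCast]; exact List.getD_eq_getElem _ _ hb
        have hget2 : PySem.List.pyGetD ((r::rs)[b]) ((a : Int)) 0 = ((r::rs)[b])[a]'(by omega) := by
          rw [PySem.List.pyGetD_natCast]; exact List.getD_eq_getElem _ _ (by omega)
        rw [List.getElem_take] at hv
        refine ⟨Int.natCast_nonneg a, Int.natCast_nonneg b, by exact_mod_cast hb, ?_, ?_, ?_⟩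
        · exact_mod_cast (by omega : a < r.length)
        · rw [hget]; exact_mod_cast (by omega : a < ((r::rs)[b]).length)
        · rw [hget, hget2]; exact hv
      · exact absurd hif (by simp)
    · rintro ⟨h0x, h0y, hylt, hxw, hxr, hval⟩
      obtain ⟨a, rfl⟩ := Int.eq_ofNat_of_zero_le h0x
      obtain ⟨b, rfl⟩ := Int.eq_ofNat_of_zero_le h0y
      have hb : b < (r :: rs).length := by exact_mod_cast hylt
      have hget : PySem.List.pyGetD (r :: rs) (b : Int) [] = (r::rs)[b] := by
        rw [PySem.List.pyGetD_natCast]; exact List.getD_eq_getElem _ _ hb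
      rw [hget] at hxr hval
      have ha : a < ((r::rs)[b]).length := by exact_mod_cast hxr
      have haw : a < r.length := by exact_mod_cast hxw
      have hget2 : PySem.List.pyGetD ((r::rs)[b]) (a : Int) 0 = ((r::rs)[b])[a] := by
        rw [PySem.List.pyGetD_natCast]; exact List.getD_eq_getElem _ _ ha
      rw [hget2] at hval
      refine ⟨((b : Int), (r :: rs)[b]), ⟨b, hb, by simp⟩,
        ((a : Int), ((r::rs)[b].take r.length)[a]'(by simp [List.length_take]; omega)),
        ⟨a, by simp [List.length_take]; omega, by simp⟩, ?_⟩
      simp only [List.getElem_take, hval, if_pos]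

-- one probe of A's inner loop = a conditional insert guarded by membership in the index, under Pre_'s clause for that point
theorem pv_step (matrix : List (List Int)) (ni : Int) (s : PySem.Set (Int × Int)) (nx ny : Int)
    (hP : ¬(0 ≤ nx ∧ 0 ≤ ny ∧
      (matrix = [] ∨ (ny < (matrix.length : Int) ∧ nx < ((PySem.List.pyGetD matrix 0 []).length : Int) ∧ ((PySem.List.pyGetD matrix ny []).length : Int) ≤ nx)))) :
    (if nx < 0 ∨ ny < 0 ∨ ((PySem.List.pyGetD matrix 0 []).length : Int) ≤ nx ∨ (matrix.length : Int) ≤ ny then s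
     else if PySem.List.pyGetD (PySem.List.pyGetD matrix ny []) nx 0 = ni then PySem.Set.add s (nx, ny) else s)
    = (if PySem.Set.contains (pvMatches matrix ni) (nx, ny) then PySem.Set.add s (nx, ny) else s) := by
  by_cases hm : (nx, ny) ∈ pvMatches matrix ni
  · have h6 := (pv_mem_matches matrix ni nx ny).1 hm
    rw [if_pos ((PySem.Set.contains_iff _ _).2 hm)]
    rw [if_neg (by push Not; omega), if_pos h6.2.2.2.2.2]
  · rw [if_neg (fun h => hm ((PySem.Set.contains_iff _ _).1 h))]
    by_cases hb : nx < 0 ∨ ny < 0 ∨ ((PySem.List.pyGetD matrix 0 []).length : Int) ≤ nx ∨ (matrix.length : Int) ≤ ny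
    · rw [if_pos hb]
    · rw [if_neg hb, if_neg]
      intro hv
      apply hm
      rw [pv_mem_matches]
      push Not at hb
      refine ⟨by omega, by omega, by omega, by omega, ?_, hv⟩
      by_contra hge
      exact hP ⟨by omega, by omega, Or.inr ⟨by omega, by omega, by omega⟩⟩

-- the two loop bodies, named (proof-side only)
def pvAStep (matrix : List (List Int)) (ni : Int) : PySem.Set (Int × Int) → (Int × Int) → PySem.Set (Int × Int) :=
  fun s c =>
    ([((0:Int),(1:Int)), (1,0), (0,-1), (-1,0)] : List (Int × Int)).foldl (fun s d =>
      let nx := c.1 + d.1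
      let ny := c.2 + d.2
      if nx < 0 ∨ ny < 0 ∨ ((PySem.List.pyGetD matrix 0 []).length : Int) ≤ nx ∨ (matrix.length : Int) ≤ ny then s
      else if PySem.List.pyGetD (PySem.List.pyGetD matrix ny []) nx 0 = ni then PySem.Set.add s (nx, ny)
      else s) s

def pvBStep (matrix : List (List Int)) (ni : Int) : PySem.Set (Int × Int) → (Int × Int) → PySem.Set (Int × Int) :=
  fun res c =>
    PySem.Set.union res (PySem.Set.inter
      (PySem.Set.ofList [(c.1, c.2 + 1), (c.1 + 1, c.2), (c.1, c.2 - 1), (c.1 - 1, c.2)]) (pvMatches matrix ni))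

-- one coordinate's contribution: A's probing inner loop = B's intersection-union step
theorem pv_inner (matrix : List (List Int)) (ni : Int) (c : Int × Int) (s : PySem.Set (Int × Int))
    (hc : ∀ d ∈ ([((0:Int),(1:Int)), (1,0), (0,-1), (-1,0)] : List (Int × Int)),
      ¬(0 ≤ c.1 + d.1 ∧ 0 ≤ c.2 + d.2 ∧
        (matrix = [] ∨ (c.2 + d.2 < (matrix.length : Int) ∧ c.1 + d.1 < ((PySem.List.pyGetD matrix 0 []).length : Int) ∧ ((PySem.List.pyGetD matrix (c.2 + d.2) []).length : Int) ≤ c.1 + d.1)))) :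
    pvAStep matrix ni s c = pvBStep matrix ni s c := by
  have h4 : ([(c.1, c.2 + 1), (c.1 + 1, c.2), (c.1, c.2 - 1), (c.1 - 1, c.2)] : List (Int × Int)).Nodup := by
    simp [Prod.ext_iff]; omega
  have hP1 := hc (0, 1) (by simp)
  have hP2 := hc (1, 0) (by simp [Prod.ext_iff])
  have hP3 := hc (0, -1) (by simp [Prod.ext_iff])
  have hP4 := hc (-1, 0) (by simp [Prod.ext_iff])
  simp only [add_zero, ← sub_eq_add_neg] at hP1 hP2 hP3 hP4
  have hR : pvBStep matrix ni s c
      = (([(c.1, c.2 + 1), (c.1 + 1, c.2), (c.1, c.2 - 1), (c.1 - 1, c.2)] : List (Int × Int)).filter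
          (fun x => PySem.Set.contains (pvMatches matrix ni) x)).foldl PySem.Set.add s := by
    unfold pvBStep
    rw [PySem.Set.ofList_eq_self_of_nodup _ h4]; rfl
  rw [hR, List.foldl_filter]
  unfold pvAStep
  simp only [List.foldl_cons, List.foldl_nil, add_zero, ← sub_eq_add_neg]
  rw [pv_step matrix ni _ _ _ hP1, pv_step matrix ni _ _ _ hP2,
      pv_step matrix ni _ _ _ hP3, pv_step matrix ni _ _ _ hP4]

theorem pv_fold (matrix : List (List Int)) (ni : Int) (cs : List (Int × Int)) (s : PySem.Set (Int × Int))
    (h : ∀ c ∈ cs, ∀ d ∈ ([((0:Int),(1:Int)), (1,0), (0,-1), (-1,0)] : List (Int × Int)),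
      ¬(0 ≤ c.1 + d.1 ∧ 0 ≤ c.2 + d.2 ∧
        (matrix = [] ∨ (c.2 + d.2 < (matrix.length : Int) ∧ c.1 + d.1 < ((PySem.List.pyGetD matrix 0 []).length : Int) ∧ ((PySem.List.pyGetD matrix (c.2 + d.2) []).length : Int) ≤ c.1 + d.1)))) :
    cs.foldl (pvAStep matrix ni) s = cs.foldl (pvBStep matrix ni) s := by
  induction cs generalizing s with
  | nil => rfl
  | cons c cs ih =>
    rw [List.foldl_cons, List.foldl_cons, pv_inner matrix ni c s (h c (by simp))]
    exact ih _ (fun c' hc' => h c' (by simp [hc']))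

theorem pv_main (matrix : List (List Int)) (coordinates : List (Int × Int)) (ni : Int)
    (hpre : Pre_find_next_inclines_1 matrix coordinates ni) :
    find_next_inclines_1 matrix coordinates ni = find_next_inclines_1_alt matrix coordinates ni := by
  have hA : find_next_inclines_1 matrix coordinates ni = coordinates.foldl (pvAStep matrix ni) [] := rfl
  have hB : find_next_inclines_1_alt matrix coordinates ni = coordinates.foldl (pvBStep matrix ni) [] := rfl
  rw [hA, hB]
  exact pv_fold matrix ni coordinates [] hpre

-- ===== VERDICT (by name: the statement is the Claim_ definition above) =====
theorem find_next_inclines_1_spec : Claim_equal_find_next_inclines_1 := by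
  intro m c n _ hpre
  exact pv_main m c n hpre
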